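-- pv_equiv track=rewrite | github.com/GazizovRustam/verification_bd_xml | verification_bd_xml.py | comparisonXmlVsBd
-- ===== SOURCE A (Python) =====
-- def comparisonXmlVsBd(list_xml_bd):
--     """Сравнить XML и BD"""
--     step_xml = []
--     frame_xml = []
--     step_bd = []
--     frame_bd = []
--     total = [[0], [0], [0], [0]]
--     count = 0
--     while count != len(list_xml_bd):
--         for i in range(len(list_xml_bd[count])):
--             if i == 0 and list_xml_bd[count][0] is None:
--                 step_xml.append(list_xml_bd[count])
--             elif i == 1 and list_xml_bd[count][1] is None:
--                 frame_xml.append(list_xml_bd[count])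
--             elif i == 2 and list_xml_bd[count][2] is None:
--                 step_bd.append(list_xml_bd[count])
--             elif i == 3 and list_xml_bd[count][3] is None:
--                 frame_bd.append(list_xml_bd[count])
--         count += 1
--     total[0] = step_xml
--     total[1] = frame_xml
--     total[2] = step_bd
--     total[3] = frame_bd
--
--     return total
-- ===== SOURCE B (Python) =====
-- def comparisonXmlVsBd(list_xml_bd):
--     """Сравнить XML и BD"""
--     return [[row for row in list_xml_bd if len(row) > k and row[k] is None]
--             for k in range(4)]
-- ===== Notes on version B (the rewrite author's own statement) =====
-- stated objective: simpler
-- what changed: Replaces the while-loop with an inner for over every column index and an if/elif chain that distributes rows into four mutable accumulators by four independent filtering comprehensions, one per column index 0..3.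
import Mathlib
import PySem

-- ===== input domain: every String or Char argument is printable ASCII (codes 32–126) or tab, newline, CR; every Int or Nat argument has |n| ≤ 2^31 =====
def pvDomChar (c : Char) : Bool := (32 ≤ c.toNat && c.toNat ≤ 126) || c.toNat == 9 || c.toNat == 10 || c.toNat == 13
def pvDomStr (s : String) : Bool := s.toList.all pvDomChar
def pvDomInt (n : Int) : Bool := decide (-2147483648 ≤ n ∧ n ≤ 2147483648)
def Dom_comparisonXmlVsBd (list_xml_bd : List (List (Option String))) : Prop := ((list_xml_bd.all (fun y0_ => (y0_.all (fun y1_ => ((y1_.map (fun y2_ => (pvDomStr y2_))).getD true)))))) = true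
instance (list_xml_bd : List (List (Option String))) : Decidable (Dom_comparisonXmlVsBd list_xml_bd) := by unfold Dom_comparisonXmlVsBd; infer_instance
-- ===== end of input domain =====

-- B replaces A's single distributing while/for loop with four independent per-column filters (simpler decomposition, same cost).


-- ===== PORT A =====
-- state = (step_xml, frame_xml, step_bd, frame_bd)
abbrev PvSt := List (List (Option String)) × List (List (Option String)) × List (List (Option String)) × List (List (Option String))

-- the body of A's inner `for i in range(len(row))` with its if/elif chain
def pvStepA (row : List (Option String)) (st : PvSt) (i : Nat) : PvSt :=
  if i = 0 ∧ row[0]? = some none then (st.1 ++ [row], st.2.1, st.2.2.1, st.2.2.2)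
  else if i = 1 ∧ row[1]? = some none then (st.1, st.2.1 ++ [row], st.2.2.1, st.2.2.2)
  else if i = 2 ∧ row[2]? = some none then (st.1, st.2.1, st.2.2.1 ++ [row], st.2.2.2)
  else if i = 3 ∧ row[3]? = some none then (st.1, st.2.1, st.2.2.1, st.2.2.2 ++ [row])
  else st

-- A's inner for-loop over range(len(row))
def pvInnerA (row : List (Option String)) (st : PvSt) : PvSt :=
  (List.range row.length).foldl (pvStepA row) st

-- A's while-loop walks the rows in order (count = 0 .. len-1); `total` is then
-- overwritten slot by slot with the four accumulators (its initial [0] placeholders,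
-- being ints, are untypable here and are all replaced before the return).
def comparisonXmlVsBd (list_xml_bd : List (List (Option String))) : List (List (List (Option String))) :=
  let st := list_xml_bd.foldl (fun st row => pvInnerA row st) ([], [], [], [])
  [st.1, st.2.1, st.2.2.1, st.2.2.2]

-- ===== PORT B =====
-- `len(row) > k and row[k] is None` is exactly `row[k]? = some none`
def comparisonXmlVsBd_alt (list_xml_bd : List (List (Option String))) : List (List (List (Option String))) :=
  (List.range 4).map (fun k => list_xml_bd.filter (fun row => decide (row[k]? = some none)))

-- ===== PRECONDITION & SPEC =====
def Spec_comparisonXmlVsBd (list_xml_bd : List (List (Option String))) (out : List (List (List (Option String)))) : Prop := out = comparisonXmlVsBd_alt list_xml_bd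
instance (list_xml_bd : List (List (Option String))) (out : List (List (List (Option String)))) : Decidable (Spec_comparisonXmlVsBd list_xml_bd out) := by unfold Spec_comparisonXmlVsBd; infer_instance

-- ===== CLAIM (what is proved, stated in full; the proofs are below) =====
def Claim_equal_comparisonXmlVsBd : Prop := ∀ (list_xml_bd : List (List (Option String))), Dom_comparisonXmlVsBd list_xml_bd → Spec_comparisonXmlVsBd list_xml_bd (comparisonXmlVsBd list_xml_bd)

-- ===== LEMMAS AND PROOFS =====

def pvBucket (row : List (Option String)) (k : Nat) : List (List (Option String)) :=
  if row[k]? = some none then [row] else []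

-- indices ≥ 4 hit no branch of the if/elif chain
lemma pvStepA_large (row : List (Option String)) (st : PvSt) (i : Nat) (h : 4 ≤ i) :
    pvStepA row st i = st := by
  unfold pvStepA
  have h0 : i ≠ 0 := by omega
  have h1 : i ≠ 1 := by omega
  have h2 : i ≠ 2 := by omega
  have h3 : i ≠ 3 := by omega
  simp [h0, h1, h2, h3]

-- if row[k] = some none then k < row.length automatically
lemma pvBucket_eq (row : List (Option String)) (k : Nat) :
    (if k < row.length ∧ row[k]? = some none then [row] else []) = pvBucket row k := by
  unfold pvBucket
  by_cases h : row[k]? = some none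
  · have hk : k < row.length := by
      by_contra hk
      rw [List.getElem?_eq_none (by omega)] at h
      simp at h
    simp [hk]
  · simp [h]

lemma pvInnerA_char (row : List (Option String)) (st : PvSt) :
    pvInnerA row st =
      (st.1 ++ pvBucket row 0, st.2.1 ++ pvBucket row 1,
       st.2.2.1 ++ pvBucket row 2, st.2.2.2 ++ pvBucket row 3) := by
  unfold pvInnerA
  -- bucket with an explicit bound: condition k < n ∧ row[k] = none
  have key : ∀ n,
      (List.range n).foldl (pvStepA row) st =
        (st.1 ++ (if 0 < n ∧ row[0]? = some none then [row] else []),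
         st.2.1 ++ (if 1 < n ∧ row[1]? = some none then [row] else []),
         st.2.2.1 ++ (if 2 < n ∧ row[2]? = some none then [row] else []),
         st.2.2.2 ++ (if 3 < n ∧ row[3]? = some none then [row] else [])) := by
    intro n
    induction n with
    | zero => simp
    | succ n ih =>
      rw [List.range_succ, List.foldl_append, ih]
      simp only [List.foldl_cons, List.foldl_nil]
      by_cases h4 : 4 ≤ n
      · rw [pvStepA_large row _ n h4]
        have e0 : (0 < n) ↔ (0 < n + 1) := by omega
        have e1 : (1 < n) ↔ (1 < n + 1) := by omega
        have e2 : (2 < n) ↔ (2 < n + 1) := by omega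
        have e3 : (3 < n) ↔ (3 < n + 1) := by omega
        simp only [e0, e1, e2, e3]
      · interval_cases n <;>
          · unfold pvStepA
            by_cases c0 : row[0]? = some none <;>
              by_cases c1 : row[1]? = some none <;>
                by_cases c2 : row[2]? = some none <;>
                  by_cases c3 : row[3]? = some none <;>
                    simp [c0, c1, c2, c3]
  rw [key row.length, pvBucket_eq, pvBucket_eq, pvBucket_eq, pvBucket_eq]

lemma pvFoldA_char (l : List (List (Option String))) (st : PvSt) :
    l.foldl (fun st row => pvInnerA row st) st =
      (st.1 ++ l.filter (fun row => decide (row[0]? = some none)),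
       st.2.1 ++ l.filter (fun row => decide (row[1]? = some none)),
       st.2.2.1 ++ l.filter (fun row => decide (row[2]? = some none)),
       st.2.2.2 ++ l.filter (fun row => decide (row[3]? = some none))) := by
  induction l generalizing st with
  | nil => simp
  | cons r t ih =>
    simp only [List.foldl_cons]
    rw [pvInnerA_char, ih]
    simp only [List.filter_cons]
    unfold pvBucket
    by_cases c0 : r[0]? = some none <;>
      by_cases c1 : r[1]? = some none <;>
        by_cases c2 : r[2]? = some none <;>
          by_cases c3 : r[3]? = some none <;>
            simp [c0, c1, c2, c3]

-- ===== VERDICT (by name: the statement is the Claim_ definition above) =====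
theorem comparisonXmlVsBd_spec : Claim_equal_comparisonXmlVsBd := by
  intro l _
  unfold Spec_comparisonXmlVsBd comparisonXmlVsBd comparisonXmlVsBd_alt
  rw [pvFoldA_char]
  simp [List.range_succ]
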